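-- pv_equiv track=rewrite | github.com/elyousfy/rfq-proposal-system | backend/toc_extractor.py | categorize_section
-- ===== SOURCE A (Python) =====
-- def categorize_section(title: str) -> str:
--     """Categorize section by title to understand typical word counts"""
--     title_lower = title.lower()
--
--     if any(word in title_lower for word in ['executive', 'summary', 'overview']):
--         return 'executive_summary'
--     elif any(word in title_lower for word in ['scope', 'approach', 'methodology']):
--         return 'scope_approach'
--     elif any(word in title_lower for word in ['technical', 'solution', 'architecture']):
--         return 'technical_solution'
--     elif any(word in title_lower for word in ['team', 'personnel', 'resources']):
--         return 'team_resources'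
--     elif any(word in title_lower for word in ['timeline', 'schedule', 'milestones']):
--         return 'timeline_schedule'
--     elif any(word in title_lower for word in ['budget', 'cost', 'pricing', 'investment']):
--         return 'budget_pricing'
--     elif any(word in title_lower for word in ['compliance', 'requirements', 'standards']):
--         return 'compliance_requirements'
--     elif any(word in title_lower for word in ['experience', 'qualifications', 'references']):
--         return 'experience_qualifications'
--     else:
--         return 'other'
-- ===== SOURCE B (Python) =====
-- # Flattened keyword->rank map; the answer is the category of the smallest rank
-- # among all matching keywords (min over matches, no early return).  Correct
-- # because A returns the FIRST matching group, i.e. the minimum group index.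
-- _KEYWORD_RANK = {
--     'executive': 0, 'summary': 0, 'overview': 0,
--     'scope': 1, 'approach': 1, 'methodology': 1,
--     'technical': 2, 'solution': 2, 'architecture': 2,
--     'team': 3, 'personnel': 3, 'resources': 3,
--     'timeline': 4, 'schedule': 4, 'milestones': 4,
--     'budget': 5, 'cost': 5, 'pricing': 5, 'investment': 5,
--     'compliance': 6, 'requirements': 6, 'standards': 6,
--     'experience': 7, 'qualifications': 7, 'references': 7,
-- }
--
-- _CATEGORIES = ['executive_summary', 'scope_approach', 'technical_solution',
--                'team_resources', 'timeline_schedule', 'budget_pricing',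
--                'compliance_requirements', 'experience_qualifications', 'other']
--
-- def categorize_section(title: str) -> str:
--     """Categorize section by title to understand typical word counts"""
--     t = title.lower()
--     best = 8  # index of 'other'
--     for kw, rank in _KEYWORD_RANK.items():
--         if kw in t:
--             best = min(best, rank)
--     return _CATEGORIES[best]
-- ===== Notes on version B (the rewrite author's own statement) =====
-- stated objective: alternative
-- what changed: Replaced the first-match if/elif chain over keyword groups by a flat keyword-to-rank map: one accumulator loop takes the minimum rank over ALL matching keywords and indexes into a category array (no grouping, no early return).
import Mathlib
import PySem

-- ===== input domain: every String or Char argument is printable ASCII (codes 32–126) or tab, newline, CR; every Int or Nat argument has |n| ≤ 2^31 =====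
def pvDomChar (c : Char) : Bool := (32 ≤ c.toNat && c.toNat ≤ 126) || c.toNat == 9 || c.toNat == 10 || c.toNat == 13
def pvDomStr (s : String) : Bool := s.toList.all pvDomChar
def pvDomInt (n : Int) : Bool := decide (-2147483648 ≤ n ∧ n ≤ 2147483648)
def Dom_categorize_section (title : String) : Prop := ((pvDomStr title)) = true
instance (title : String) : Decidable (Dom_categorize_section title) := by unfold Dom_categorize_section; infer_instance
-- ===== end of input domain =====

-- B replaces A's first-match if/elif chain by a flat keyword→rank map, a min-accumulator
-- loop over all matching keywords, and an index into a category array (alternative; same cost).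

-- ===== PORT A =====
def categorize_section (title : String) : String :=
  let title_lower := PySem.Str.lower title
  if ["executive", "summary", "overview"].any (fun word => PySem.Str.isIn word title_lower) then
    "executive_summary"
  else if ["scope", "approach", "methodology"].any (fun word => PySem.Str.isIn word title_lower) then
    "scope_approach"
  else if ["technical", "solution", "architecture"].any (fun word => PySem.Str.isIn word title_lower) then
    "technical_solution"
  else if ["team", "personnel", "resources"].any (fun word => PySem.Str.isIn word title_lower) then
    "team_resources"
  else if ["timeline", "schedule", "milestones"].any (fun word => PySem.Str.isIn word title_lower) then
    "timeline_schedule"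
  else if ["budget", "cost", "pricing", "investment"].any (fun word => PySem.Str.isIn word title_lower) then
    "budget_pricing"
  else if ["compliance", "requirements", "standards"].any (fun word => PySem.Str.isIn word title_lower) then
    "compliance_requirements"
  else if ["experience", "qualifications", "references"].any (fun word => PySem.Str.isIn word title_lower) then
    "experience_qualifications"
  else
    "other"

-- ===== PORT B =====
-- _KEYWORD_RANK.items() in dict insertion order
def pvKeywordRank : List (String × Nat) :=
  [("executive", 0), ("summary", 0), ("overview", 0),
   ("scope", 1), ("approach", 1), ("methodology", 1),
   ("technical", 2), ("solution", 2), ("architecture", 2),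
   ("team", 3), ("personnel", 3), ("resources", 3),
   ("timeline", 4), ("schedule", 4), ("milestones", 4),
   ("budget", 5), ("cost", 5), ("pricing", 5), ("investment", 5),
   ("compliance", 6), ("requirements", 6), ("standards", 6),
   ("experience", 7), ("qualifications", 7), ("references", 7)]

def pvCategories : List String :=
  ["executive_summary", "scope_approach", "technical_solution",
   "team_resources", "timeline_schedule", "budget_pricing",
   "compliance_requirements", "experience_qualifications", "other"]

-- loop body: if kw in t: best = min(best, rank)
def pvStep (t : String) (best : Nat) (p : String × Nat) : Nat :=
  if PySem.Str.isIn p.1 t then Nat.min best p.2 else best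

def categorize_section_alt (title : String) : String :=
  let t := PySem.Str.lower title
  let best := pvKeywordRank.foldl (pvStep t) 8
  pvCategories.getD best "other"

-- ===== PRECONDITION & SPEC =====
def Spec_categorize_section (title : String) (out : String) : Prop := out = categorize_section_alt title
instance (title : String) (out : String) : Decidable (Spec_categorize_section title out) := by unfold Spec_categorize_section; infer_instance

-- ===== CLAIM (what is proved, stated in full; the proofs are below) =====
def Claim_equal_categorize_section : Prop := ∀ (title : String), Dom_categorize_section title → Spec_categorize_section title (categorize_section title)

-- ===== LEMMAS AND PROOFS =====

-- folding pvStep over a block of keywords sharing one rank r updates the accumulator by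
-- 'min best r' exactly when some keyword of the block matches
theorem pvFold_group (t : String) (kws : List String) (r : Nat)
    (rest : List (String × Nat)) (best : Nat) :
    List.foldl (pvStep t) best (kws.map (fun k => (k, r)) ++ rest) =
      List.foldl (pvStep t)
        (if kws.any (fun k => PySem.Str.isIn k t) then Nat.min best r else best) rest := by
  induction kws generalizing best with
  | nil => simp
  | cons k ks ih =>
      simp only [List.map_cons, List.cons_append, List.foldl_cons, List.any_cons]
      rw [show pvStep t best (k, r) = if PySem.Str.isIn k t then Nat.min best r else best from rfl,
          ih]
      congr 1
      by_cases h : PySem.Str.isIn k t = true <;>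
        by_cases h2 : (ks.any fun k => PySem.Str.isIn k t) = true <;>
          simp_all

-- the keyword list as eight rank-blocks
theorem pvKeywordRank_blocks :
    pvKeywordRank =
      (["executive", "summary", "overview"].map (fun k => (k, 0))) ++
      (["scope", "approach", "methodology"].map (fun k => (k, 1))) ++
      (["technical", "solution", "architecture"].map (fun k => (k, 2))) ++
      (["team", "personnel", "resources"].map (fun k => (k, 3))) ++
      (["timeline", "schedule", "milestones"].map (fun k => (k, 4))) ++
      (["budget", "cost", "pricing", "investment"].map (fun k => (k, 5))) ++
      (["compliance", "requirements", "standards"].map (fun k => (k, 6))) ++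
      (["experience", "qualifications", "references"].map (fun k => (k, 7))) ++
      ([] : List (String × Nat)) := by rfl

-- ===== VERDICT (by name: the statement is the Claim_ definition above) =====
theorem categorize_section_spec : Claim_equal_categorize_section := by
  intro title _
  unfold Spec_categorize_section categorize_section categorize_section_alt
  rw [pvKeywordRank_blocks]
  simp only [List.append_assoc]
  rw [pvFold_group, pvFold_group, pvFold_group, pvFold_group, pvFold_group, pvFold_group,
      pvFold_group, pvFold_group]
  simp only [List.foldl_nil]
  generalize (["executive", "summary", "overview"].any (fun w => PySem.Str.isIn w (PySem.Str.lower title))) = b0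
  generalize (["scope", "approach", "methodology"].any (fun w => PySem.Str.isIn w (PySem.Str.lower title))) = b1
  generalize (["technical", "solution", "architecture"].any (fun w => PySem.Str.isIn w (PySem.Str.lower title))) = b2
  generalize (["team", "personnel", "resources"].any (fun w => PySem.Str.isIn w (PySem.Str.lower title))) = b3
  generalize (["timeline", "schedule", "milestones"].any (fun w => PySem.Str.isIn w (PySem.Str.lower title))) = b4
  generalize (["budget", "cost", "pricing", "investment"].any (fun w => PySem.Str.isIn w (PySem.Str.lower title))) = b5
  generalize (["compliance", "requirements", "standards"].any (fun w => PySem.Str.isIn w (PySem.Str.lower title))) = b6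
  generalize (["experience", "qualifications", "references"].any (fun w => PySem.Str.isIn w (PySem.Str.lower title))) = b7
  cases b0 <;> cases b1 <;> cases b2 <;> cases b3 <;> cases b4 <;> cases b5 <;> cases b6 <;> cases b7 <;> rfl
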